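-- pv_equiv track=rewrite | github.com/linroger/FinanceCompendium | scripts/extract_keyphrases_v2.py | find_ngram_positions
-- ===== SOURCE A (Python) =====
-- from typing import Iterable, Iterator, Sequence
--
-- def find_ngram_positions(tokens: Sequence[str], ngram: Sequence[str]) -> list[int]:
--     n = len(ngram)
--     if n == 0 or len(tokens) < n:
--         return []
--     out: list[int] = []
--     first = ngram[0]
--     last = ngram[-1]
--     limit = len(tokens) - n
--     for i in range(limit + 1):
--         if tokens[i] != first or tokens[i + n - 1] != last:
--             continue
--         match = True
--         for j in range(1, n - 1):
--             if tokens[i + j] != ngram[j]: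
--                 match = False
--                 break
--         if match:
--             out.append(i)
--     return out
-- ===== SOURCE B (Python) =====
-- _P = (1 << 61) - 1
-- _B = 1000003
--
--
-- def _thash(s):
--     h = 0
--     for c in s:
--         h = (h * 131 + ord(c)) % _P
--     return h
--
--
-- def find_ngram_positions(tokens, ngram):
--     toks = list(tokens)
--     ng = list(ngram)
--     n = len(ng)
--     m = len(toks)
--     if n == 0 or m < n:
--         return []
--     hs = [_thash(t) for t in toks]
--     target = 0
--     for g in ng:
--         target = (target * _B + _thash(g)) % _P
--     h = 0
--     for x in hs[:n]:
--         h = (h * _B + x) % _P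
--     pw = pow(_B, n - 1, _P)
--     out = []
--     for i in range(m - n + 1):
--         if h == target and toks[i:i + n] == ng:
--             out.append(i)
--         if i + n < m:
--             h = ((h - hs[i] * pw) * _B + hs[i + n]) % _P
--     return out
-- ===== Notes on version B (the rewrite author's own statement) =====
-- stated objective: alternative
-- what changed: Replaces A's per-position window comparison (first/last pre-check plus an inner element loop) by Rabin-Karp matching: per-token hashes are precomputed once, a rolling polynomial hash of each window is compared to the pattern hash, and the full window is compared only on a hash match.
import Mathlib
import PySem

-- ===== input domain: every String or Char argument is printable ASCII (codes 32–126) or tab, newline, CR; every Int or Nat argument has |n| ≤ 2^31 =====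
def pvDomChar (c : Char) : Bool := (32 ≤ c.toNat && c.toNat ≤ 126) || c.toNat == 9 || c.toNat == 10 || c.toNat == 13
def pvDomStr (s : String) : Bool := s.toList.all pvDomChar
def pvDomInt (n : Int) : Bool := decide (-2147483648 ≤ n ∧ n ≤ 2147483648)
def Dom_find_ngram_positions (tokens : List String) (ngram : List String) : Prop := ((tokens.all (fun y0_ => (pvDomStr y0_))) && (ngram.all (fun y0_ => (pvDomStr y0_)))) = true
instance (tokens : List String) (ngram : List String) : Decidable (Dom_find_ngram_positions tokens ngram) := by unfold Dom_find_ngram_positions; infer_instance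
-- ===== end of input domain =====

-- B replaces A's position-by-position window comparison by Rabin–Karp matching over the token
-- sequence: precomputed token hashes, a rolling polynomial window hash compared to the pattern
-- hash, and a full window comparison only on hash match; the two return the same list everywhere.

-- ===== PORT A =====
-- Transliteration of A. Inside the main loop every index i, i+n-1, i+j is provably in range, so
-- comparing the pyGet? Options equals Python's comparison of the element values there; the
-- wildcard match arm is unreachable (on that branch n ≥ 1, so ngram[0] and ngram[-1] exist).
def find_ngram_positions (tokens : List String) (ngram : List String) : List Int :=
  if ((ngram.length : Int) == 0) || ((tokens.length : Int) < (ngram.length : Int)) then []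
  else
    match PySem.List.pyGet? ngram 0, PySem.List.pyGet? ngram (-1) with
    | some first, some last =>
      (PySem.List.pyRange 0 (((tokens.length : Int) - (ngram.length : Int)) + 1)).foldl
        (fun out i =>
          if (!(PySem.List.pyGet? tokens i == some first))
              || (!(PySem.List.pyGet? tokens (i + (ngram.length : Int) - 1) == some last)) then
            out
          else
            -- the flag-and-break loop over j in range(1, n-1) is an early-exit conjunction
            if (PySem.List.pyRange 1 ((ngram.length : Int) - 1)).all
                (fun j => PySem.List.pyGet? tokens (i + j) == PySem.List.pyGet? ngram j) then
              out ++ [i]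
            else out)
        []
    | _, _ => []

-- ===== PORT B =====
-- Rabin–Karp constants and per-token hash (_P, _B, _thash in Source B; ord c = c.toNat, exact).
def pvP : Int := 2305843009213693951
def pvB : Int := 1000003

def pvThash (s : String) : Int :=
  s.toList.foldl (fun h c => (h * 131 + (c.toNat : Int)) % pvP) 0

-- Port of B's main loop: state (h, out); hs[i] is read with pyGetD (the loop only reads
-- provably in-range indices, where pyGetD is exact); pow(_B, n-1, _P) = _B^(n-1) % _P.
def find_ngram_positions_alt (tokens : List String) (ngram : List String) : List Int :=
  if ((ngram.length : Int) == 0) || ((tokens.length : Int) < (ngram.length : Int)) then []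
  else
    ((PySem.List.pyRange 0 ((tokens.length : Int) - (ngram.length : Int) + 1)).foldl
      (fun st i =>
        let out := if st.1 == ngram.foldl (fun t g => (t * pvB + pvThash g) % pvP) 0
            && (PySem.List.slice tokens (some i) (some (i + (ngram.length : Int))) == ngram)
          then st.2 ++ [i] else st.2
        let h := if i + (ngram.length : Int) < (tokens.length : Int)
          then ((st.1 - PySem.List.pyGetD (tokens.map pvThash) i 0 * (pvB ^ (ngram.length - 1) % pvP)) * pvB
                  + PySem.List.pyGetD (tokens.map pvThash) (i + (ngram.length : Int)) 0) % pvP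
          else st.1
        (h, out))
      ((PySem.List.slice (tokens.map pvThash) none (some (ngram.length : Int))).foldl
        (fun h x => (h * pvB + x) % pvP) 0, [])).2

-- ===== PRECONDITION & SPEC =====
def Spec_find_ngram_positions (tokens : List String) (ngram : List String) (out : List Int) : Prop := out = find_ngram_positions_alt tokens ngram
instance (tokens : List String) (ngram : List String) (out : List Int) : Decidable (Spec_find_ngram_positions tokens ngram out) := by unfold Spec_find_ngram_positions; infer_instance

-- ===== CLAIM (what is proved, stated in full; the proofs are below) =====
def Claim_equal_find_ngram_positions : Prop := ∀ (tokens : List String) (ngram : List String), Dom_find_ngram_positions tokens ngram → Spec_find_ngram_positions tokens ngram (find_ngram_positions tokens ngram)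

-- ===== LEMMAS AND PROOFS =====

-- hash of a sequence of token hashes (the value both target and the rolling h compute)
def pvSeqHash (l : List Int) : Int := l.foldl (fun h x => (h * pvB + x) % pvP) 0

lemma pvSeqHash_append (l : List Int) (u : Int) :
    pvSeqHash (l ++ [u]) = (pvSeqHash l * pvB + u) % pvP := by
  simp [pvSeqHash]

lemma pvSeqHash_cons_modeq (x : Int) (w : List Int) :
    Int.ModEq pvP (pvSeqHash (x :: w)) (x * pvB ^ w.length + pvSeqHash w) := by
  induction w using List.reverseRecOn with
  | nil =>
      show pvSeqHash [x] % pvP = _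
      rw [show pvSeqHash [x] = (0 * pvB + x) % pvP from rfl,
        Int.emod_emod_of_dvd _ dvd_rfl]
      show (0 * pvB + x) % pvP = (x * pvB ^ ([] : List Int).length + pvSeqHash []) % pvP
      norm_num [pvSeqHash]
  | append_singleton w u ih =>
      have h1 : pvSeqHash (x :: (w ++ [u])) = (pvSeqHash (x :: w) * pvB + u) % pvP := by
        rw [show x :: (w ++ [u]) = (x :: w) ++ [u] by simp, pvSeqHash_append]
      rw [h1, pvSeqHash_append]
      have := ((ih.mul_right pvB).add_right u)
      calc (pvSeqHash (x :: w) * pvB + u) % pvP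
          ≡ pvSeqHash (x :: w) * pvB + u [ZMOD pvP] := Int.emod_emod_of_dvd _ dvd_rfl
        _ ≡ (x * pvB ^ w.length + pvSeqHash w) * pvB + u [ZMOD pvP] := this
        _ = x * pvB ^ (w ++ [u]).length + (pvSeqHash w * pvB + u) := by
            simp [pow_succ]; ring
        _ ≡ x * pvB ^ (w ++ [u]).length + (pvSeqHash w * pvB + u) % pvP [ZMOD pvP] :=
            (Int.ModEq.add_left _ (Int.emod_emod_of_dvd _ dvd_rfl).symm)

-- the rolling-hash update moves the window one step right
lemma pvRoll (hs : List Int) (k n : Nat) (hn : 1 ≤ n) (hkm : k + n < hs.length) :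
    ((pvSeqHash ((hs.drop k).take n) - hs[k]'(by omega) * (pvB ^ (n - 1) % pvP)) * pvB
        + hs[k + n]'hkm) % pvP
      = pvSeqHash ((hs.drop (k + 1)).take n) := by
  obtain ⟨p, rfl⟩ : ∃ p, n = p + 1 := ⟨n - 1, by omega⟩
  set w : List Int := (hs.drop (k + 1)).take p with hw
  have hwlen : w.length = p := by
    rw [hw, List.length_take, List.length_drop]; omega
  have hdecomp : (hs.drop k).take (p + 1) = hs[k]'(by omega) :: w := by
    rw [List.drop_eq_getElem_cons (by omega), List.take_succ_cons]
  have hdecomp2 : (hs.drop (k + 1)).take (p + 1) = w ++ [hs[k + (p + 1)]'hkm] := by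
    rw [List.take_add_one, hw]
    congr 1
    rw [List.getElem?_drop, show k + 1 + p = k + (p + 1) from by omega,
      List.getElem?_eq_getElem hkm]
    rfl
  rw [hdecomp, hdecomp2, pvSeqHash_append]
  have h1 : Int.ModEq pvP
      (pvSeqHash (hs[k]'(by omega) :: w) - hs[k]'(by omega) * (pvB ^ (p + 1 - 1) % pvP))
      (pvSeqHash w) := by
    have h2 := pvSeqHash_cons_modeq (hs[k]'(by omega)) w
    have h3 : Int.ModEq pvP (hs[k]'(by omega) * (pvB ^ (p + 1 - 1) % pvP))
        (hs[k]'(by omega) * pvB ^ p) :=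
      Int.ModEq.mul_left _ (by rw [Nat.add_sub_cancel]; exact Int.emod_emod_of_dvd _ dvd_rfl)
    have h4 := h2.sub h3
    rw [hwlen] at h4
    simpa using h4
  exact ((h1.mul_right pvB).add_right _)

-- B's target is the sequence hash of the hashed pattern
lemma pvTarget_eq (ngram : List String) :
    ngram.foldl (fun t g => (t * pvB + pvThash g) % pvP) 0
      = pvSeqHash (ngram.map pvThash) := by
  rw [pvSeqHash, List.foldl_map]

-- windows of the hashed token list are hashes of windows
lemma pvWindow_map (tokens : List String) (k n : Nat) :
    ((tokens.map pvThash).drop k).take n = ((tokens.drop k).take n).map pvThash := by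
  rw [List.map_take, List.map_drop]

-- the loop invariant: with h the hash of the current window, the scan appends exactly the
-- positions whose window equals the pattern
lemma pvScan (tokens ngram : List String) (hn : 1 ≤ ngram.length)
    (_hm : ngram.length ≤ tokens.length) :
    ∀ (c k : Nat) (h : Int) (out : List Int),
      (k : Int) + c = (tokens.length : Int) - ngram.length + 1 →
      h = pvSeqHash (((tokens.map pvThash).drop k).take ngram.length) →
      ((PySem.List.pyRange (k : Int) ((tokens.length : Int) - ngram.length + 1) 1).foldl
        (fun st i =>
          let out := if st.1 == ngram.foldl (fun t g => (t * pvB + pvThash g) % pvP) 0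
              && (PySem.List.slice tokens (some i) (some (i + (ngram.length : Int))) == ngram)
            then st.2 ++ [i] else st.2
          let h := if i + (ngram.length : Int) < (tokens.length : Int)
            then ((st.1 - PySem.List.pyGetD (tokens.map pvThash) i 0 * (pvB ^ (ngram.length - 1) % pvP)) * pvB
                    + PySem.List.pyGetD (tokens.map pvThash) (i + (ngram.length : Int)) 0) % pvP
            else st.1
          (h, out))
        (h, out)).2
      = out ++ (PySem.List.pyRange (k : Int) ((tokens.length : Int) - ngram.length + 1) 1).filter
          (fun i => PySem.List.slice tokens (some i) (some (i + (ngram.length : Int))) == ngram) := by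
  intro c
  induction c with
  | zero =>
      intro k h out hkc _
      rw [PySem.List.pyRange_one_eq_nil (by omega)]
      simp
  | succ c ih =>
      intro k h out hkc hinv
      rw [PySem.List.pyRange_one_cons (by omega)]
      simp only [List.foldl_cons, List.filter_cons]
      -- the hash test is redundant on a true window match
      have hcond : (h == ngram.foldl (fun t g => (t * pvB + pvThash g) % pvP) 0
            && (PySem.List.slice tokens (some (k : Int)) (some ((k : Int) + (ngram.length : Int))) == ngram))
          = (PySem.List.slice tokens (some (k : Int)) (some ((k : Int) + (ngram.length : Int))) == ngram) := by
        cases hsl : (PySem.List.slice tokens (some (k : Int)) (some ((k : Int) + (ngram.length : Int))) == ngram) with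
        | false => simp
        | true =>
            have hweq : (tokens.drop k).take ngram.length = ngram := by
              rw [← PySem.List.slice_natCast_add]; exact beq_iff_eq.mp hsl
            have : h = ngram.foldl (fun t g => (t * pvB + pvThash g) % pvP) 0 := by
              rw [hinv, pvTarget_eq, pvWindow_map, hweq]
            simp [this]
      rw [hcond]
      -- the updated state
      set out' := if (PySem.List.slice tokens (some (k : Int)) (some ((k : Int) + (ngram.length : Int))) == ngram)
        then out ++ [(k : Int)] else out with hout'
      cases c with
      | zero =>
          -- last iteration: the remaining range is empty, the final h is irrelevant
          have hb : ((k : Int) + 1) = (tokens.length : Int) - ngram.length + 1 := by omega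
          rw [hb, PySem.List.pyRange_one_eq_nil (le_refl _), List.foldl_nil]
          cases hsl : (PySem.List.slice tokens (some (k : Int)) (some ((k : Int) + (ngram.length : Int))) == ngram) <;>
            simp [hout', hsl]
      | succ c =>
          -- k + n < m here, so the update branch fires and pvRoll re-establishes the invariant
          have hklt : k + ngram.length < tokens.length := by omega
          have hbr : ((k : Int) + (ngram.length : Int) < (tokens.length : Int)) := by
            exact_mod_cast hklt
          have hlen : k < (tokens.map pvThash).length := by simp; omega
          have hget1 : PySem.List.pyGetD (tokens.map pvThash) (k : Int) 0
              = (tokens.map pvThash)[k]'(by simpa using (by omega : k < tokens.length)) := by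
            rw [PySem.List.pyGetD_natCast,
              List.getD_eq_getElem _ _ (by simpa using (by omega : k < tokens.length))]
          have hget2 : PySem.List.pyGetD (tokens.map pvThash) ((k : Int) + (ngram.length : Int)) 0
              = (tokens.map pvThash)[k + ngram.length]'(by simpa using hklt) := by
            rw [show ((k : Int) + (ngram.length : Int)) = ((k + ngram.length : Nat) : Int) by push_cast; ring,
              PySem.List.pyGetD_natCast,
              List.getD_eq_getElem _ _ (by simpa using hklt)]
          have hnext : (if (k : Int) + (ngram.length : Int) < (tokens.length : Int)
              then ((h - PySem.List.pyGetD (tokens.map pvThash) (k : Int) 0 * (pvB ^ (ngram.length - 1) % pvP)) * pvB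
                      + PySem.List.pyGetD (tokens.map pvThash) ((k : Int) + (ngram.length : Int)) 0) % pvP
              else h)
              = pvSeqHash (((tokens.map pvThash).drop (k + 1)).take ngram.length) := by
            rw [if_pos hbr, hget1, hget2, hinv]
            exact pvRoll (tokens.map pvThash) k ngram.length hn (by simpa using hklt)
          have hstep := ih (k + 1)
            (pvSeqHash (((tokens.map pvThash).drop (k + 1)).take ngram.length)) out'
            (by push_cast; push_cast at hkc; omega) rfl
          rw [show ((k : Int) + 1) = (((k + 1 : Nat) : Int)) by push_cast; ring] at *
          simp only [] at hstep ⊢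
          rw [hnext, hstep]
          cases hsl : (PySem.List.slice tokens (some (k : Int)) (some ((k : Int) + (ngram.length : Int))) == ngram) <;>
            simp [hout', hsl]

-- a window equals the ngram iff it does so pointwise
lemma window_eq_iff (tokens ngram : List String) (k : Nat) :
    (tokens.drop k).take ngram.length = ngram ↔
      ∀ j, j < ngram.length → tokens[k + j]? = ngram[j]? := by
  constructor
  · intro h j hj
    have := congrArg (fun l => l[j]?) h
    simp only [List.getElem?_take, List.getElem?_drop] at this
    rwa [if_pos hj] at this
  · intro h
    apply List.ext_getElem?
    intro j
    rw [List.getElem?_take]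
    by_cases hj : j < ngram.length
    · rw [if_pos hj, List.getElem?_drop]; exact h j hj
    · rw [if_neg hj]
      exact (List.getElem?_eq_none (by omega)).symm

-- the test A performs at position i = ↑k equals the slice comparison
lemma cond_eq (tokens ngram : List String) (first last : String)
    (hf : PySem.List.pyGet? ngram 0 = some first)
    (hl : PySem.List.pyGet? ngram (-1) = some last)
    (hne : ngram ≠ []) (k : Nat) :
    (((PySem.List.pyGet? tokens (↑k) == some first)
        && (PySem.List.pyGet? tokens (↑k + (ngram.length : Int) - 1) == some last))
      && (PySem.List.pyRange 1 ((ngram.length : Int) - 1)).all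
          (fun j => PySem.List.pyGet? tokens (↑k + j) == PySem.List.pyGet? ngram j))
    = (PySem.List.slice tokens (some (↑k)) (some (↑k + (ngram.length : Int))) == ngram) := by
  have hn1 : 1 ≤ ngram.length := List.length_pos_iff.mpr hne
  have hslice : PySem.List.slice tokens (some (↑k)) (some (↑k + (ngram.length : Int)))
      = (tokens.drop k).take ngram.length := by
    simpa using PySem.List.slice_natCast_add tokens k ngram.length
  have hidx1 : (↑k + (ngram.length : Int) - 1) = ((k + ngram.length - 1 : Nat) : Int) := by
    omega
  have hf0 : ngram[0]? = some first := by
    rw [show ((0:Int)) = ((0:Nat):Int) from rfl, PySem.List.pyGet?_natCast] at hf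
    exact hf
  have hl0 : ngram[ngram.length - 1]? = some last := by
    rw [show PySem.List.pyGet? ngram (-1) = ngram[ngram.length - 1]? from by
      simp [pysem, List.getLast?_eq_getElem?]] at hl
    exact hl
  rw [Bool.eq_iff_iff, hslice]
  simp only [Bool.and_eq_true, beq_iff_eq, List.all_eq_true, hidx1,
    PySem.List.pyGet?_natCast]
  rw [window_eq_iff tokens ngram k]
  constructor
  · rintro ⟨⟨h1, h2⟩, h3⟩ j hj
    by_cases hj0 : j = 0
    · subst hj0; rw [Nat.add_zero, h1, hf0]
    · by_cases hjl : j = ngram.length - 1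
      · subst hjl
        rw [show k + (ngram.length - 1) = k + ngram.length - 1 by omega, h2, hl0]
      · have hmem : ((j : Nat) : Int) ∈ PySem.List.pyRange 1 ((ngram.length : Int) - 1) := by
          rw [PySem.List.mem_pyRange_one]
          constructor
          · exact_mod_cast Nat.one_le_iff_ne_zero.mpr hj0
          · omega
        have h4 := h3 _ hmem
        rw [show ((k : Int) + (j : Nat)) = ((k + j : Nat) : Int) by omega,
          PySem.List.pyGet?_natCast, PySem.List.pyGet?_natCast] at h4
        exact h4
  · intro h
    refine ⟨⟨?_, ?_⟩, ?_⟩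
    · rw [← Nat.add_zero k, h 0 (by omega), hf0]
    · rw [show k + ngram.length - 1 = k + (ngram.length - 1) by omega,
        h (ngram.length - 1) (by omega), hl0]
    · intro j hmem
      rw [PySem.List.mem_pyRange_one] at hmem
      obtain ⟨hj1, hj2⟩ := hmem
      have hjlt : j.toNat < ngram.length := by omega
      rw [show ((k : Int) + j) = ((k + j.toNat : Nat) : Int) by omega,
        PySem.List.pyGet?_natCast]
      conv_rhs => rw [show j = ((j.toNat : Nat) : Int) by omega]
      rw [PySem.List.pyGet?_natCast]
      exact h j.toNat hjlt

-- A's loop body is an append-if body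
lemma bodyA_eq (tokens ngram : List String) (first last : String) :
    (fun (out : List Int) (i : Int) =>
      if (!(PySem.List.pyGet? tokens i == some first))
          || (!(PySem.List.pyGet? tokens (i + (ngram.length : Int) - 1) == some last)) then
        out
      else
        if (PySem.List.pyRange 1 ((ngram.length : Int) - 1)).all
            (fun j => PySem.List.pyGet? tokens (i + j) == PySem.List.pyGet? ngram j) then
          out ++ [i]
        else out)
    = (fun (out : List Int) (i : Int) =>
      if (((PySem.List.pyGet? tokens i == some first)
            && (PySem.List.pyGet? tokens (i + (ngram.length : Int) - 1) == some last))
          && (PySem.List.pyRange 1 ((ngram.length : Int) - 1)).all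
              (fun j => PySem.List.pyGet? tokens (i + j) == PySem.List.pyGet? ngram j))
        then out ++ [i] else out) := by
  funext out i
  cases h1 : (PySem.List.pyGet? tokens i == some first) <;>
    cases h2 : (PySem.List.pyGet? tokens (i + (ngram.length : Int) - 1) == some last) <;>
      simp

-- A equals the filter of the range by the slice comparison
lemma A_eq_filter (tokens ngram : List String) (hne : ngram ≠ [])
    (hm : ngram.length ≤ tokens.length) :
    find_ngram_positions tokens ngram
      = (PySem.List.pyRange 0 ((tokens.length : Int) - ngram.length + 1)).filter
          (fun i => PySem.List.slice tokens (some i) (some (i + (ngram.length : Int))) == ngram) := by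
  have hn1 : 1 ≤ ngram.length := List.length_pos_iff.mpr hne
  have hf : PySem.List.pyGet? ngram 0 = some (ngram[0]'(by omega)) := by
    have h0 : (0:Int) = ((0:Nat):Int) := rfl
    rw [h0, PySem.List.pyGet?_natCast, List.getElem?_eq_getElem (by omega)]
  have hl : PySem.List.pyGet? ngram (-1) = some (ngram[ngram.length - 1]'(by omega)) := by
    have h0 : PySem.List.pyGet? ngram (-1) = ngram[ngram.length - 1]? := by
      simp [pysem, List.getLast?_eq_getElem?]
    rw [h0, List.getElem?_eq_getElem (by omega)]
  have hg1 : ((ngram.length : Int) == 0) = false := by simp; omega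
  have hg2 : decide ((tokens.length : Int) < (ngram.length : Int)) = false := by
    simp; exact_mod_cast hm
  rw [find_ngram_positions]
  simp only [hf, hl, hg1, hg2, Bool.or_self]
  rw [bodyA_eq tokens ngram _ _, PySem.List.foldl_append_if_eq_filter]
  simp only [List.nil_append]
  apply List.filter_congr
  intro i hi
  rw [PySem.List.mem_pyRange_one] at hi
  obtain ⟨hi0, hi1⟩ := hi
  have hk : i = ((i.toNat : Nat) : Int) := by omega
  rw [hk]
  exact cond_eq tokens ngram _ _ hf hl hne i.toNat

-- ===== VERDICT (by name: the statement is the Claim_ definition above) =====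
theorem find_ngram_positions_spec : Claim_equal_find_ngram_positions := by
  intro tokens ngram _
  unfold Spec_find_ngram_positions
  by_cases hne : ngram = []
  · subst hne; simp [find_ngram_positions, find_ngram_positions_alt]
  · have hn1 : 1 ≤ ngram.length := List.length_pos_iff.mpr hne
    by_cases hlt : tokens.length < ngram.length
    · have hcond : (((ngram.length : Int) == 0)
          || ((tokens.length : Int) < (ngram.length : Int))) = true := by
        simp only [Bool.or_eq_true, beq_iff_eq, decide_eq_true_eq]
        right; exact_mod_cast hlt
      rw [find_ngram_positions, find_ngram_positions_alt, if_pos hcond, if_pos hcond]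
    · rw [Nat.not_lt] at hlt
      have hcond : (((ngram.length : Int) == 0)
          || ((tokens.length : Int) < (ngram.length : Int))) = false := by
        simp only [Bool.or_eq_false_iff, beq_eq_false_iff_ne, decide_eq_false_iff_not, not_lt]
        constructor
        · omega
        · exact_mod_cast hlt
      rw [A_eq_filter tokens ngram hne hlt]
      rw [find_ngram_positions_alt,
        if_neg (by simp only [hcond]; exact Bool.false_ne_true)]
      have hB := pvScan tokens ngram hn1 hlt (tokens.length - ngram.length + 1) 0
        (pvSeqHash (((tokens.map pvThash).drop 0).take ngram.length)) []
        (by push_cast; omega) rfl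
      simp only [Nat.cast_zero, List.nil_append] at hB
      have h0 : ((PySem.List.slice (tokens.map pvThash) none (some ((ngram.length : Nat) : Int))).foldl
            (fun h x => (h * pvB + x) % pvP) 0)
          = pvSeqHash (((tokens.map pvThash).drop 0).take ngram.length) := by
        rw [PySem.List.slice_to_natCast, List.drop_zero]; rfl
      rw [h0]
      exact hB.symm
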